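-- pv_equiv track=rewrite | github.com/miliar/Code_Jam_Webscraper | solutions_python/solutions_year16_round0_nr2/4384.py | smile
-- ===== SOURCE A (Python) =====
-- def flip(stack, n):
--     picked = stack[:n]
--     flipped = []
--     for p in picked:
--         flipped.append(not p)
--     return list(reversed(flipped)) + stack[n:]
--
-- def smile(stack):
--     j = 0
--     while True:
--         for i, p in enumerate(stack):
--             if p != stack[0]:
--                 stack = flip(stack, i)
--                 j += 1
--                 break
--         else:
--             if False in stack:
--                 return j+1
--             else:
--                 return j
-- ===== SOURCE B (Python) =====
-- def smile(stack):
--     flips = 0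
--     for x, y in zip(stack, stack[1:]):
--         if x != y:
--             flips += 1
--     if stack and not stack[-1]:
--         flips += 1
--     return flips
-- ===== Notes on version B (the rewrite author's own statement) =====
-- stated objective: faster
-- what changed: Replaces the repeated flip-the-prefix simulation (each round rebuilds the list) by a single pass that counts adjacent orientation changes plus one if the last pancake is face-down.
import Mathlib
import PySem

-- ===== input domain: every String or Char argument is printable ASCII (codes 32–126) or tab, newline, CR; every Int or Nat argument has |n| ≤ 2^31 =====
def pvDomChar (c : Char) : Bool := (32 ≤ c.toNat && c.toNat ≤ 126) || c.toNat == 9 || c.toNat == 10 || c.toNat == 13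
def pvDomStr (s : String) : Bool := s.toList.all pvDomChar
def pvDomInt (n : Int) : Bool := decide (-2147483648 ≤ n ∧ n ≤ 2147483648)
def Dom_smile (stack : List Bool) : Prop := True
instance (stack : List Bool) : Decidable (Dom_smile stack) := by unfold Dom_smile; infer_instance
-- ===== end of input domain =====

-- B replaces A's repeated flip-the-prefix simulation by one pass counting adjacent
-- orientation changes, plus one if the last pancake is face-down (objective: faster).

-- ===== PORT A =====

-- flip(stack, n): reverse of the element-wise negation of stack[:n], followed by stack[n:]
-- (n comes from enumerate, so it is a Nat and stack[:n] is List.take n).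
def flipA (stack : List Bool) (n : Nat) : List Bool :=
  ((stack.take n).map not).reverse ++ stack.drop n

-- the inner `for i, p in enumerate(stack): if p != stack[0]: …` search, carrying the index
def aFind (b : Bool) : List Bool → Nat → Option Nat
  | [], _ => none
  | p :: rest, i => if p ≠ b then some i else aFind b rest (i + 1)

-- number of adjacent transitions; used only as the termination measure of A's while-loop
def tcount : List Bool → Nat
  | a :: b :: r => (if a ≠ b then 1 else 0) + tcount (b :: r)
  | _ => 0

theorem aFind_replicate_append (b : Bool) (rest : List Bool) :
    ∀ (n k : Nat), aFind b (List.replicate n b ++ (!b) :: rest) k = some (k + n) := by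
  intro n
  induction n with
  | zero => intro k; cases b <;> simp [aFind]
  | succ m ih =>
      intro k
      have hb : ¬ (b ≠ b) := by simp
      simp only [List.replicate_succ, List.cons_append, aFind, if_neg hb]
      rw [ih (k + 1)]
      exact congrArg some (by omega)

theorem shape_decomp (l : List Bool) (b : Bool) :
    (∀ x ∈ l, x = b) ∨ ∃ n rest, l = List.replicate n b ++ (!b) :: rest := by
  induction l with
  | nil => left; simp
  | cons a t ih =>
      by_cases ha : a = b
      · subst ha
        rcases ih with h | ⟨n, rest, h⟩
        · left; intro x hx
          rcases List.mem_cons.mp hx with h' | h'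
          · exact h'
          · exact h x h'
        · right; exact ⟨n + 1, rest, by simp [List.replicate_succ, h]⟩
      · right
        refine ⟨0, t, ?_⟩
        have : a = !b := by cases a <;> cases b <;> simp_all
        simp [this]

theorem tcount_replicate_append (b c : Bool) (rest : List Bool) :
    ∀ n, 0 < n →
      tcount (List.replicate n b ++ c :: rest) = (if b ≠ c then 1 else 0) + tcount (c :: rest) := by
  intro n
  induction n with
  | zero => omega
  | succ m ih =>
      intro _
      cases m with
      | zero => simp [tcount]
      | succ m' =>
          have h := ih (by omega)
          simp only [List.replicate_succ, List.cons_append] at h ⊢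
          rw [show tcount (b :: b :: (List.replicate m' b ++ c :: rest))
                = (if b ≠ b then 1 else 0) + tcount (b :: (List.replicate m' b ++ c :: rest))
              from rfl, h]
          simp

theorem flipA_shape (b : Bool) (n : Nat) (rest : List Bool) :
    flipA (List.replicate n b ++ (!b) :: rest) n = List.replicate n (!b) ++ (!b) :: rest := by
  have hlen : (List.replicate n b).length = n := List.length_replicate
  simp [flipA, List.take_left' hlen, List.drop_left' hlen]

theorem headI_decomp_pos (b : Bool) (n : Nat) (rest : List Bool)
    (h : (List.replicate n b ++ (!b) :: rest).headI = b) : 0 < n := by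
  cases n with
  | zero => simp at h
  | succ m => omega

theorem flip_tcount_lt (stack : List Bool) (i : Nat)
    (h : aFind stack.headI stack 0 = some i) : tcount (flipA stack i) < tcount stack := by
  rcases shape_decomp stack stack.headI with hall | ⟨n, rest, hs⟩
  · exfalso
    have : aFind stack.headI stack 0 = none := by
      clear h
      generalize hb : stack.headI = b at hall
      clear hb
      induction stack with
      | nil => rfl
      | cons a t ih =>
          have ha : a = b := hall a (by simp)
          have : ∀ x ∈ t, x = b := fun x hx => hall x (by simp [hx])
          -- aFind ignores the start index for the none-result
          have key : ∀ (l : List Bool) (k : Nat), (∀ x ∈ l, x = b) → aFind b l k = none := by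
            intro l
            induction l with
            | nil => intro k _; rfl
            | cons c u ihu =>
                intro k hl
                have hc : c = b := hl c (by simp)
                have : ¬ (c ≠ b) := by simp [hc]
                simpa [aFind, this] using ihu (k + 1) (fun x hx => hl x (by simp [hx]))
          exact key (a :: t) 0 hall
    rw [this] at h; simp at h
  · set b := stack.headI with hb
    have hn : 0 < n := headI_decomp_pos b n rest (by rw [← hs])
    have hfind : aFind b stack 0 = some n := by rw [hs]; simpa using aFind_replicate_append b rest n 0
    have hi : i = n := by rw [h] at hfind; exact Option.some_inj.mp hfind
    rw [hi, hs, flipA_shape]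
    rw [tcount_replicate_append b (!b) rest n hn,
        tcount_replicate_append (!b) (!b) rest n hn]
    cases b <;> simp

-- smile(stack): while True: flip at the first index differing from stack[0]; when none,
-- return j+1 if False is in the stack else j.  (stack[0] of a nonempty list is headI;
-- for [] the for-loop never tests it.)
def smileGo (stack : List Bool) (j : Int) : Int :=
  match h : aFind stack.headI stack 0 with
  | some i => smileGo (flipA stack i) (j + 1)
  | none => if false ∈ stack then j + 1 else j
termination_by tcount stack
decreasing_by exact flip_tcount_lt stack i h

def smile (stack : List Bool) : Int := smileGo stack 0

-- ===== PORT B =====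
def smile_alt (stack : List Bool) : Int :=
  let flips := (stack.zip stack.tail).foldl
    (fun acc (p : Bool × Bool) => if p.1 ≠ p.2 then acc + 1 else acc) (0 : Int)
  match stack.getLast? with
  | some false => flips + 1
  | _ => flips

-- ===== PRECONDITION & SPEC =====
def Spec_smile (stack : List Bool) (out : Int) : Prop := out = smile_alt stack
instance (stack : List Bool) (out : Int) : Decidable (Spec_smile stack out) := by unfold Spec_smile; infer_instance

-- ===== CLAIM (what is proved, stated in full; the proofs are below) =====
def Claim_equal_smile : Prop := ∀ (stack : List Bool), Dom_smile stack → Spec_smile stack (smile stack)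

-- ===== LEMMAS AND PROOFS =====

theorem aFind_none_all_eq (b : Bool) :
    ∀ (l : List Bool) (k : Nat), aFind b l k = none → ∀ x ∈ l, x = b := by
  intro l
  induction l with
  | nil => intro k _ x hx; simp at hx
  | cons c u ih =>
      intro k h x hx
      by_cases hc : c = b
      · have : ¬ (c ≠ b) := by simp [hc]
        rw [aFind, if_neg this] at h
        rcases List.mem_cons.mp hx with h' | h'
        · exact h' ▸ hc
        · exact ih (k + 1) h x h'
      · rw [aFind, if_pos hc] at h
        simp at h

theorem tcount_replicate (b : Bool) : ∀ n, tcount (List.replicate n b) = 0 := by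
  intro n
  induction n with
  | zero => rfl
  | succ m ih =>
      cases m with
      | zero => rfl
      | succ m' =>
          simp only [List.replicate_succ] at ih ⊢
          rw [show tcount (b :: b :: List.replicate m' b)
                = (if b ≠ b then 1 else 0) + tcount (b :: List.replicate m' b) from rfl, ih]
          simp

theorem zip_fold_tcount :
    ∀ (l : List Bool) (acc : Int),
      (l.zip l.tail).foldl (fun acc (p : Bool × Bool) => if p.1 ≠ p.2 then acc + 1 else acc) acc
        = acc + (tcount l : Int) := by
  intro l
  induction l with
  | nil => intro acc; simp [tcount]
  | cons a t ih =>
      intro acc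
      cases t with
      | nil => simp [tcount]
      | cons b r =>
          simp only [List.tail_cons] at ih
          simp only [List.zip_cons_cons, List.tail_cons, List.foldl_cons]
          rw [ih]
          rw [show tcount (a :: b :: r) = (if a ≠ b then 1 else 0) + tcount (b :: r) from rfl]
          split_ifs <;> push_cast <;> ring

theorem smile_alt_eq (stack : List Bool) :
    smile_alt stack
      = (tcount stack : Int) + (if stack.getLast? = some false then 1 else 0) := by
  unfold smile_alt
  rw [zip_fold_tcount]
  rcases h : stack.getLast? with _ | b
  · simp
  · cases b <;> simp

theorem smileGo_none (stack : List Bool) (j : Int)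
    (h : aFind stack.headI stack 0 = none) :
    smileGo stack j = if false ∈ stack then j + 1 else j := by
  rw [smileGo.eq_def]
  split
  · next i h' => rw [h] at h'; simp at h'
  · rfl

theorem smileGo_some (stack : List Bool) (j : Int) (i : Nat)
    (h : aFind stack.headI stack 0 = some i) :
    smileGo stack j = smileGo (flipA stack i) (j + 1) := by
  rw [smileGo.eq_def]
  split
  · next i' h' =>
      rw [h] at h'
      rw [Option.some_inj.mp h']
  · next h' => rw [h] at h'; simp at h'

theorem smileGo_none_val (stack : List Bool) (j : Int)
    (h : aFind stack.headI stack 0 = none) :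
    smileGo stack j = j + smile_alt stack := by
  rw [smileGo_none stack j h]
  have hall := aFind_none_all_eq stack.headI stack 0 h
  cases stack with
  | nil => simp [smile_alt]
  | cons c t =>
      have hc : (c :: t).headI = c := rfl
      rw [hc] at hall
      have hrep : c :: t = List.replicate (c :: t).length c :=
        List.eq_replicate_length.mpr hall
      rw [smile_alt_eq, hrep, tcount_replicate]
      have hlast : (List.replicate (c :: t).length c).getLast? = some c := by
        rw [show (c :: t).length = t.length + 1 from rfl, List.replicate_succ']
        simp
      rw [hlast]
      have hmem : false ∈ List.replicate (c :: t).length c ↔ c = false := by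
        cases c <;> simp [List.mem_replicate]
      rcases Bool.eq_false_or_eq_true c with hcf | hct <;> subst c <;> simp

theorem smileGo_eq (stack : List Bool) (j : Int) :
    smileGo stack j = j + smile_alt stack := by
  induction stack, j using smileGo.induct with
  | case1 s j i h ih =>
      rw [smileGo_some s j i h, ih]
      rcases shape_decomp s s.headI with hall | ⟨n, rest, hs⟩
      · exfalso
        have key : ∀ (l : List Bool) (k : Nat), (∀ x ∈ l, x = s.headI) → aFind s.headI l k = none := by
          intro l
          induction l with
          | nil => intro k _; rfl
          | cons c u ihu =>
              intro k hl
              have hc : ¬ (c ≠ s.headI) := by simp [hl c (by simp)]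
              simpa [aFind, hc] using ihu (k + 1) (fun x hx => hl x (by simp [hx]))
        rw [key s 0 hall] at h; simp at h
      · set b := s.headI with hb
        have hn : 0 < n := headI_decomp_pos b n rest (by rw [← hs])
        have hfind : aFind b s 0 = some n := by
          rw [hs]; simpa using aFind_replicate_append b rest n 0
        have hi : i = n := by rw [h] at hfind; exact Option.some_inj.mp hfind
        rw [hi, hs, flipA_shape, smile_alt_eq, smile_alt_eq,
            tcount_replicate_append b (!b) rest n hn,
            tcount_replicate_append (!b) (!b) rest n hn,
            List.getLast?_append_of_ne_nil _ (List.cons_ne_nil _ _),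
            List.getLast?_append_of_ne_nil _ (List.cons_ne_nil _ _)]
        cases b <;> simp <;> ring
  | case2 s j h _ => exact smileGo_none_val s j h
  | case3 s j h _ => exact smileGo_none_val s j h

-- ===== VERDICT (by name: the statement is the Claim_ definition above) =====
theorem smile_spec : Claim_equal_smile := by
  intro stack _
  unfold Spec_smile smile
  rw [smileGo_eq]
  ring
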